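-- pv_equiv track=rewrite | github.com/sebastianboujon/uxui | ejercicio22.py | usarLaFuerza
-- ===== SOURCE A (Python) =====
-- def usarLaFuerza(mochila, indice=0, objetos_sacados=0):
--     if indice >= len(mochila):
--         return False, objetos_sacados
--
--     objeto_actual = mochila[indice]
--
--     if objeto_actual == "sable de luz":
--         return True, objetos_sacados
--
--     objetos_sacados += 1
--
--     return usarLaFuerza(mochila, indice + 1, objetos_sacados)
-- ===== SOURCE B (Python) =====
-- def usarLaFuerza(mochila, indice=0, objetos_sacados=0):
--     for i in range(indice, len(mochila)):
--         if mochila[i] == "sable de luz":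
--             return True, objetos_sacados
--         objetos_sacados += 1
--     return False, objetos_sacados
-- ===== Notes on version B (the rewrite author's own statement) =====
-- stated objective: idiomatic
-- what changed: Replaces the tail recursion with a flat for-loop over range(indice, len(mochila)) keeping the counter as an accumulator.
import Mathlib
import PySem

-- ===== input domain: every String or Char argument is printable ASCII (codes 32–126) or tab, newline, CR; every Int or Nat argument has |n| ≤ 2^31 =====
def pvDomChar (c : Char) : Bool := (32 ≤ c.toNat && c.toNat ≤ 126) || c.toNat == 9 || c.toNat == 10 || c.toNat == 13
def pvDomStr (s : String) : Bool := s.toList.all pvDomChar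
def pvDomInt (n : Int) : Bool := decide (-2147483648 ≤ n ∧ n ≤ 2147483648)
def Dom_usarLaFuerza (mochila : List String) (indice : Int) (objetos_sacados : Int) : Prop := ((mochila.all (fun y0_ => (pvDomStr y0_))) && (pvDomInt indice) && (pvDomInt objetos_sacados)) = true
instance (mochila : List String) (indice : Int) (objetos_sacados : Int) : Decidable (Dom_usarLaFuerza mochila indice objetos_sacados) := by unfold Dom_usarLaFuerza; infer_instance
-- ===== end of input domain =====

-- B replaces A's tail recursion with a flat loop over range(indice, len(mochila))
-- keeping the counter as an accumulator (idiomatic, O(1) space; return value only).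

-- ===== PORT A =====
def usarLaFuerza (mochila : List String) (indice : Int) (objetos_sacados : Int) : Bool × Int :=
  if mochila.length ≤ indice then (false, objetos_sacados)
  else
    match PySem.List.pyGet? mochila indice with
    | none => (false, objetos_sacados)  -- IndexError in Python; excluded by Pre_usarLaFuerza
    | some objeto_actual =>
      if objeto_actual = "sable de luz" then (true, objetos_sacados)
      else usarLaFuerza mochila (indice + 1) (objetos_sacados + 1)
termination_by (mochila.length - indice).toNat
decreasing_by simp at *; omega

-- ===== PORT B =====
-- the for-loop of Source B over the remaining indices, with early return on a match
def pvAltLoop (mochila : List String) (is : List Int) (objetos_sacados : Int) : Bool × Int :=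
  match is with
  | [] => (false, objetos_sacados)
  | i :: rest =>
    match PySem.List.pyGet? mochila i with
    | none => (false, objetos_sacados)  -- IndexError in Python; excluded by Pre_usarLaFuerza
    | some o =>
      if o = "sable de luz" then (true, objetos_sacados)
      else pvAltLoop mochila rest (objetos_sacados + 1)

def usarLaFuerza_alt (mochila : List String) (indice : Int) (objetos_sacados : Int) : Bool × Int :=
  pvAltLoop mochila (PySem.List.pyRange indice (mochila.length) 1) objetos_sacados

-- ===== PRECONDITION & SPEC =====
-- Pre_ excludes exactly the inputs where Python A raises IndexError: indice below -len(mochila)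
-- (and below len, so the guard does not fire).
def Pre_usarLaFuerza (mochila : List String) (indice : Int) (objetos_sacados : Int) : Prop :=
  -(mochila.length : Int) ≤ indice ∨ (mochila.length : Int) ≤ indice
instance (mochila : List String) (indice : Int) (objetos_sacados : Int) : Decidable (Pre_usarLaFuerza mochila indice objetos_sacados) := by unfold Pre_usarLaFuerza; infer_instance

def pvWitness_usarLaFuerza : List String × Int × Int := (["linterna", "sable de luz"], 0, 0)

def Spec_usarLaFuerza (mochila : List String) (indice : Int) (objetos_sacados : Int) (out : Bool × Int) : Prop := out = usarLaFuerza_alt mochila indice objetos_sacados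
instance (mochila : List String) (indice : Int) (objetos_sacados : Int) (out : Bool × Int) : Decidable (Spec_usarLaFuerza mochila indice objetos_sacados out) := by unfold Spec_usarLaFuerza; infer_instance

-- ===== CLAIM (what is proved, stated in full; the proofs are below) =====
def Claim_equal_usarLaFuerza : Prop := ∀ (mochila : List String) (indice : Int) (objetos_sacados : Int), Dom_usarLaFuerza mochila indice objetos_sacados → Pre_usarLaFuerza mochila indice objetos_sacados → Spec_usarLaFuerza mochila indice objetos_sacados (usarLaFuerza mochila indice objetos_sacados)

-- ===== LEMMAS AND PROOFS =====

theorem usarLaFuerza_eq_alt (mochila : List String) (indice objetos_sacados : Int)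
    (h : -(mochila.length : Int) ≤ indice) :
    usarLaFuerza mochila indice objetos_sacados = usarLaFuerza_alt mochila indice objetos_sacados := by
  unfold usarLaFuerza_alt
  by_cases hge : (mochila.length : Int) ≤ indice
  · rw [usarLaFuerza, if_pos hge, PySem.List.pyRange_one_eq_nil hge]
    rfl
  · push_neg at hge
    rw [usarLaFuerza, if_neg (not_le.mpr hge), PySem.List.pyRange_one_cons hge, pvAltLoop]
    have hin : PySem.Raise.InRange mochila.length indice := by
      unfold PySem.Raise.InRange; omega
    obtain ⟨x, hx⟩ : ∃ x, PySem.List.pyGet? mochila indice = some x := by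
      rcases hsome : PySem.List.pyGet? mochila indice with _ | x
      · exact absurd hin ((PySem.List.pyGet?_eq_none_iff _ _).mp hsome)
      · exact ⟨x, rfl⟩
    rw [hx]
    dsimp only
    by_cases hs : x = "sable de luz"
    · simp [hs]
    · rw [if_neg hs, if_neg hs]
      have := usarLaFuerza_eq_alt mochila (indice + 1) (objetos_sacados + 1) (by omega)
      unfold usarLaFuerza_alt at this
      exact this
termination_by (mochila.length - indice).toNat
decreasing_by omega

-- ===== VERDICT (by name: the statement is the Claim_ definition above) =====
theorem usarLaFuerza_spec : Claim_equal_usarLaFuerza := by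
  intro mochila indice objetos_sacados _ hpre
  unfold Spec_usarLaFuerza
  rcases hpre with h | h
  · exact usarLaFuerza_eq_alt mochila indice objetos_sacados h
  · exact usarLaFuerza_eq_alt mochila indice objetos_sacados (by have := Int.natCast_nonneg mochila.length; omega)
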